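-- pv_equiv track=rewrite | github.com/bhscodz/python_assignments | assignment3/que3.py | growth
-- ===== SOURCE A (Python) =====
-- def growth(cycles):
--     total=1
--     for i in range(1,cycles+1):
--         if (i%2==0):
--             total+=1
--         else:
--             total*=2
--     return total
-- ===== SOURCE B (Python) =====
-- def growth(cycles):
--     if cycles <= 0:
--         return 1
--     if cycles % 2 == 0:
--         return (1 << (cycles // 2 + 1)) - 1
--     return (1 << ((cycles + 1) // 2 + 1)) - 2
-- ===== Notes on version B (the rewrite author's own statement) =====
-- stated objective: faster
-- what changed: Replaces the cycle-by-cycle loop (double on odd steps, increment on even steps) with a closed-form power-of-two formula computed by one bit shift.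
import Mathlib
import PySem

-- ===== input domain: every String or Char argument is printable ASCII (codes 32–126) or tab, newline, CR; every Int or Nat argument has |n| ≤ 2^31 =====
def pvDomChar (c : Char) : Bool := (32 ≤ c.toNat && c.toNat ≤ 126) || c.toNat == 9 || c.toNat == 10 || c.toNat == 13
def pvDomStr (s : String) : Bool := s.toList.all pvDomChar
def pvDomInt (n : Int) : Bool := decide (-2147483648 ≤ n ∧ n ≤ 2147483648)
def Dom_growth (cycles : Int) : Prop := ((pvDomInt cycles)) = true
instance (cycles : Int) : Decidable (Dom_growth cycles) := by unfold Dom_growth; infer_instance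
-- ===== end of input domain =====

-- B replaces the per-cycle loop with a closed-form power-of-two formula (one shift); return value equivalent.

-- ===== PORT A =====
def growth (cycles : Int) : Int :=
  (PySem.List.pyRange 1 (cycles + 1) 1).foldl
    (fun total i => if PySem.Int.mod i 2 = 0 then total + 1 else total * 2) 1

-- ===== PORT B =====
def growth_alt (cycles : Int) : Int :=
  if cycles ≤ 0 then 1
  else if PySem.Int.mod cycles 2 = 0 then
    2 ^ (PySem.Int.floordiv cycles 2 + 1).toNat - 1
  else
    2 ^ (PySem.Int.floordiv (cycles + 1) 2 + 1).toNat - 2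

-- ===== PRECONDITION & SPEC =====
def Spec_growth (cycles : Int) (out : Int) : Prop := out = growth_alt cycles
instance (cycles : Int) (out : Int) : Decidable (Spec_growth cycles out) := by unfold Spec_growth; infer_instance

-- ===== CLAIM (what is proved, stated in full; the proofs are below) =====
def Claim_equal_growth : Prop := ∀ (cycles : Int), Dom_growth cycles → Spec_growth cycles (growth cycles)

-- ===== LEMMAS AND PROOFS =====

-- one more loop iteration appended on the right
theorem growth_succ (n : Int) (h : 0 ≤ n) :
    growth (n + 1) =
      (if PySem.Int.mod (n + 1) 2 = 0 then growth n + 1 else growth n * 2) := by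
  unfold growth
  rw [show n + 1 + 1 = (n + 1) + 1 by ring,
      PySem.List.pyRange_one_succ_right (by omega : (1:Int) ≤ n + 1),
      List.foldl_append]
  simp only [List.foldl]

theorem growth_closed (k : Nat) :
    growth (2 * (k : Int)) = 2 ^ (k + 1) - 1 ∧
    growth (2 * (k : Int) + 1) = 2 ^ (k + 2) - 2 := by
  induction k with
  | zero =>
      refine ⟨by decide, by decide⟩
  | succ k ih =>
      obtain ⟨ihe, iho⟩ := ih
      have h2 : (2 : Int) * (k + 1 : Nat) = (2 * (k : Int) + 1) + 1 := by push_cast; ring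
      have he : growth (2 * ((k + 1 : Nat) : Int)) = 2 ^ (k + 2) - 1 := by
        rw [h2, growth_succ _ (by positivity), iho]
        have : PySem.Int.mod (2 * (k : Int) + 1 + 1) 2 = 0 := by
          rw [PySem.Int.mod_eq_emod_of_pos (by norm_num : (0:Int) < 2)]; omega
        rw [if_pos this]; ring
      refine ⟨he, ?_⟩
      have h3 : (2 : Int) * ((k + 1 : Nat) : Int) + 1 = 2 * ((k + 1 : Nat) : Int) + 1 := rfl
      rw [growth_succ _ (by positivity), he]
      have : ¬ PySem.Int.mod (2 * ((k + 1 : Nat) : Int) + 1) 2 = 0 := by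
        rw [PySem.Int.mod_eq_emod_of_pos (by norm_num : (0:Int) < 2)]; omega
      rw [if_neg this]; ring

-- ===== VERDICT (by name: the statement is the Claim_ definition above) =====
theorem growth_spec : Claim_equal_growth := by
  intro n _
  unfold Spec_growth growth_alt
  by_cases hle : n ≤ 0
  · rw [if_pos hle]
    unfold growth
    rw [PySem.List.pyRange_one_eq_nil (by omega)]
    rfl
  · rw [if_neg hle]
    rw [not_le] at hle
    rcases Int.even_or_odd n with ⟨k, hk⟩ | ⟨k, hk⟩
    · -- n = 2k, k ≥ 1
      have hk' : (0:Int) ≤ k := by omega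
      obtain ⟨m, rfl⟩ := Int.eq_ofNat_of_zero_le hk'
      have hn : n = 2 * (m : Int) := by omega
      subst hn
      have hmod : PySem.Int.mod (2 * (m : Int)) 2 = 0 := by
        rw [PySem.Int.mod_eq_emod_of_pos (by norm_num : (0:Int) < 2)]; omega
      rw [if_pos hmod, (growth_closed m).1]
      have hdiv : PySem.Int.floordiv (2 * (m : Int)) 2 = m := by
        rw [PySem.Int.floordiv_eq_ediv_of_pos (by norm_num : (0:Int) < 2)]; omega
      rw [hdiv, show ((m : Int) + 1).toNat = m + 1 by omega]
    · -- n = 2k+1, k ≥ 0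
      have hk' : (0:Int) ≤ k := by omega
      obtain ⟨m, rfl⟩ := Int.eq_ofNat_of_zero_le hk'
      have hn : n = 2 * (m : Int) + 1 := by omega
      subst hn
      have hmod : ¬ PySem.Int.mod (2 * (m : Int) + 1) 2 = 0 := by
        rw [PySem.Int.mod_eq_emod_of_pos (by norm_num : (0:Int) < 2)]; omega
      rw [if_neg hmod, (growth_closed m).2]
      have hdiv : PySem.Int.floordiv (2 * (m : Int) + 1 + 1) 2 = (m : Int) + 1 := by
        rw [PySem.Int.floordiv_eq_ediv_of_pos (by norm_num : (0:Int) < 2)]; omega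
      rw [hdiv, show ((m : Int) + 1 + 1).toNat = m + 2 by omega]
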